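-- pv_equiv track=rewrite | github.com/p65454/codestates | graph/src/Part_1.py | search_route
-- ===== SOURCE A (Python) =====
-- def search_route(connection_info, start_node, end_node, route=[]):
--     route = route + [start_node]
--     if start_node == end_node:
--         return route
--     if not connection_info.__contains__(start_node):
--         return None
--     for node in connection_info[start_node]:
--         if node not in route:
--             return search_route(connection_info, node, end_node, route)
-- ===== SOURCE B (Python) =====
-- def search_route(connection_info, start_node, end_node, route=[]):
--     rev = route[::-1]
--     seen = set(route)
--     current = start_node
--     while True:
--         rev = [current] + rev
--         seen.add(current)
--         if current == end_node:
--             return rev[::-1]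
--         if current not in connection_info:
--             return None
--         nxt = next((n for n in connection_info[current] if n not in seen), None)
--         if nxt is None:
--             return None
--         current = nxt
-- ===== Notes on version B (the rewrite author's own statement) =====
-- stated objective: alternative
-- what changed: Replaced the tail recursion building route by list concatenation with an explicit while-loop that keeps the path in a reversed cons-accumulator plus a visited set, picking the first unvisited neighbor with next()/find?.
import Mathlib
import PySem

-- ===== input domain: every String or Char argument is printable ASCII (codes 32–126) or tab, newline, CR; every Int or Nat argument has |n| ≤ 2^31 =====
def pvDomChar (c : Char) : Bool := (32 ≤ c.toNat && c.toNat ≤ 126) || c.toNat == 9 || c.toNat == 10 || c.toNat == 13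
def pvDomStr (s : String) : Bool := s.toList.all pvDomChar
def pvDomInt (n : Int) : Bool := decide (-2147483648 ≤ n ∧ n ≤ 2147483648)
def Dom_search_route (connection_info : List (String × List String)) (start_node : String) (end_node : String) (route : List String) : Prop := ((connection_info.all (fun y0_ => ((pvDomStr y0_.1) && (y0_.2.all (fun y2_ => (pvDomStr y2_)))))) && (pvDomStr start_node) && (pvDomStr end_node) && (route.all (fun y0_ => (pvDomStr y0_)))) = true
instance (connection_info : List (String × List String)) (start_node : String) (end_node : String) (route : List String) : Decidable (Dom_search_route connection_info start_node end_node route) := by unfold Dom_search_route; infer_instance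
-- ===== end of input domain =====

-- B replaces A's tail recursion with an explicit loop over a reversed-path accumulator and a visited set (objective: alternative decomposition, same cost).
-- ===== PORT A =====
-- Fuel bound for the recursion: each recursive call after the first visits a fresh node drawn
-- from some adjacency list, so (total adjacency entries) + 1 calls always suffice.
def pvFuel (connection_info : List (String × List String)) : Nat :=
  (connection_info.map (fun p => p.2.length)).sum + 1

-- A's 'for node in connection_info[start_node]: if node not in route: return <recurse>'
def search_route_for (rec : String → List String → Option (List String)) :
    List String → List String → Option (List String)
  | [], _ => none
  | n :: rest, route => if !(route.contains n) then rec n route else search_route_for rec rest route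

def search_route_go (connection_info : List (String × List String)) (end_node : String) :
    Nat → String → List String → Option (List String)
  | 0, _, _ => none
  | fuel + 1, start_node, route =>
    let route' := route ++ [start_node]
    if start_node = end_node then some route'
    else
      match (connection_info.find? (fun p => p.1 == start_node)).map (fun p => p.2) with
      | none => none
      | some ns => search_route_for (search_route_go connection_info end_node fuel) ns route'

def search_route (connection_info : List (String × List String)) (start_node : String)
    (end_node : String) (route : List String) : Option (List String) :=
  search_route_go connection_info end_node (pvFuel connection_info) start_node route

-- ===== PORT B =====
-- B's while-loop: reversed path accumulator + a visited set, first unvisited neighbor via find?.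
def search_route_alt_loop (connection_info : List (String × List String)) (end_node : String) :
    Nat → String → List String → PySem.Set String → Option (List String)
  | 0, _, _, _ => none
  | fuel + 1, current, rev, seen =>
    let rev' := current :: rev
    let seen' := PySem.Set.add seen current
    if current = end_node then some rev'.reverse
    else
      match (connection_info.find? (fun p => p.1 == current)).map (fun p => p.2) with
      | none => none
      | some ns =>
        match ns.find? (fun n => !(PySem.Set.contains seen' n)) with
        | none => none
        | some nxt => search_route_alt_loop connection_info end_node fuel nxt rev' seen'

def search_route_alt (connection_info : List (String × List String)) (start_node : String)
    (end_node : String) (route : List String) : Option (List String) :=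
  search_route_alt_loop connection_info end_node (pvFuel connection_info) start_node
    route.reverse (PySem.Set.ofList route)

-- ===== PRECONDITION & SPEC =====
def Spec_search_route (connection_info : List (String × List String)) (start_node : String) (end_node : String) (route : List String) (out : Option (List String)) : Prop := out = search_route_alt connection_info start_node end_node route
instance (connection_info : List (String × List String)) (start_node : String) (end_node : String) (route : List String) (out : Option (List String)) : Decidable (Spec_search_route connection_info start_node end_node route out) := by unfold Spec_search_route; infer_instance

-- ===== CLAIM (what is proved, stated in full; the proofs are below) =====
def Claim_equal_search_route : Prop := ∀ (connection_info : List (String × List String)) (start_node : String) (end_node : String) (route : List String), Dom_search_route connection_info start_node end_node route → Spec_search_route connection_info start_node end_node route (search_route connection_info start_node end_node route)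

-- ===== LEMMAS AND PROOFS =====

-- A's inner for-loop equals B's find?-based step, provided 'seen' has the same membership as 'route'.
theorem for_eq_find (rec : String → List String → Option (List String))
    (rec' : String → Option (List String)) (ns route : List String) (seen : PySem.Set String)
    (hmem : ∀ x, x ∈ seen ↔ x ∈ route)
    (hrec : ∀ n, rec n route = rec' n) :
    search_route_for rec ns route =
      match ns.find? (fun n => !(PySem.Set.contains seen n)) with
      | none => none
      | some nxt => rec' nxt := by
  induction ns with
  | nil => simp [search_route_for]
  | cons n rest ih =>
    simp only [search_route_for, List.find?_cons]
    by_cases h : n ∈ route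
    · simp [h, hmem n, ih]
    · simp [h, hmem n, hrec n]

theorem set_add_mem (seen : PySem.Set String) (c x : String) (route : List String)
    (hmem : ∀ y, y ∈ seen ↔ y ∈ route) :
    x ∈ PySem.Set.add seen c ↔ x ∈ route ++ [c] := by
  simp [PySem.Set.mem_add, hmem]

theorem go_eq_loop (ci : List (String × List String)) (endn : String) (fuel : Nat) :
    ∀ (start : String) (route rev : List String) (seen : PySem.Set String),
    rev = route.reverse → (∀ x, x ∈ seen ↔ x ∈ route) →
    search_route_go ci endn fuel start route =
      search_route_alt_loop ci endn fuel start rev seen := by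
  induction fuel with
  | zero => intros; rfl
  | succ f ih =>
    intro start route rev seen hrev hmem
    simp only [search_route_go, search_route_alt_loop]
    have hmem' : ∀ x, x ∈ PySem.Set.add seen start ↔ x ∈ route ++ [start] :=
      fun x => set_add_mem seen start x route hmem
    by_cases he : start = endn
    · simp [he, hrev]
    · simp only [he, if_false]
      cases hfind : (ci.find? (fun p => p.1 == start)).map (fun p => p.2) with
      | none => simp
      | some ns =>
        exact for_eq_find (search_route_go ci endn f)
          (fun n => search_route_alt_loop ci endn f n (start :: rev) (PySem.Set.add seen start))
          ns (route ++ [start]) (PySem.Set.add seen start) hmem'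
          (fun n => ih n (route ++ [start]) (start :: rev) (PySem.Set.add seen start)
            (by simp [hrev]) hmem')

-- ===== VERDICT (by name: the statement is the Claim_ definition above) =====
theorem search_route_spec : Claim_equal_search_route := by
  intro ci s e r _
  unfold Spec_search_route search_route search_route_alt
  exact go_eq_loop ci e (pvFuel ci) s r r.reverse (PySem.Set.ofList r) rfl
    (fun x => PySem.Set.mem_ofList r x)
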